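-- pv_equiv track=rewrite | github.com/Vedir18/JD_INZ_AGAS | CreateBoneList.py | ParseToBoneList
-- ===== SOURCE A (Python) =====
-- def ParseToBoneList(unparsed):
--     boneList = []
--     armList = []
--     readingArmature = True
--     curRead = ""
--     curArm = ""
--     for i in range(len(unparsed)):
--         if(readingArmature):
--             if(unparsed[i]==":"):
--                 if(curRead not in armList):
--                     armList.append(curRead)
--                 readingArmature = False
--                 curArm = curRead
--                 curRead = ""
--             else:
--                 curRead += unparsed[i]
--         else:
--             if(unparsed[i]=="\n"):
--                 boneList.append(curArm+":"+curRead)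
--                 readingArmature = True
--                 curArm = ""
--                 curRead = ""
--             else:
--                 curRead += unparsed[i]
--     return boneList, armList
-- ===== SOURCE B (Python) =====
-- def ParseToBoneList(unparsed):
--     boneList = []
--     armList = []
--     pos = 0
--     while True:
--         colon = unparsed.find(':', pos)
--         if colon == -1:
--             break
--         arm = unparsed[pos:colon]
--         if arm not in armList:
--             armList.append(arm)
--         nl = unparsed.find('\n', colon + 1)
--         if nl == -1:
--             break
--         boneList.append(arm + ':' + unparsed[colon + 1:nl])
--         pos = nl + 1
--     return boneList, armList
-- ===== Notes on version B (the rewrite author's own statement) =====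
-- stated objective: simpler
-- what changed: Replaced the per-character boolean state machine that accumulates characters one by one with a delimiter-scanning loop that jumps directly from ':' to '\n' using str.find and slicing.
import Mathlib
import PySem

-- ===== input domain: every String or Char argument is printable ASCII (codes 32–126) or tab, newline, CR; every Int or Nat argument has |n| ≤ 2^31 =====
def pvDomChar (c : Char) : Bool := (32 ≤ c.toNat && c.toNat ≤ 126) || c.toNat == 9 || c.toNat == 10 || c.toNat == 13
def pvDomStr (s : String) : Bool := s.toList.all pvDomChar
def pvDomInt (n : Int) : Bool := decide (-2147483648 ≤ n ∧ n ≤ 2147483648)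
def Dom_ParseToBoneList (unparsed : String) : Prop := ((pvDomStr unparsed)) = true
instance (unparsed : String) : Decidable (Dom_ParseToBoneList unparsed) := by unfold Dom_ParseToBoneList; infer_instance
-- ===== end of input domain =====

-- B replaces A's per-character boolean state machine with a delimiter-scanning loop
-- (find the next ':' , then the next '\n', slicing out names directly); objective: simpler.

-- ===== PORT A =====
-- per-character state: (boneList, armList, readingArmature, curRead, curArm)
def pvStepA (st : List String × List String × Bool × String × String) (c : Char) :
    List String × List String × Bool × String × String :=
  match st with
  | (boneList, armList, readingArmature, curRead, curArm) =>
    if readingArmature then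
      if c = ':' then
        let armList' := if armList.contains curRead then armList else armList ++ [curRead]
        (boneList, armList', false, "", curRead)
      else
        (boneList, armList, true, curRead.push c, curArm)
    else
      if c = '\n' then
        (boneList ++ [curArm ++ ":" ++ curRead], armList, true, "", "")
      else
        (boneList, armList, false, curRead.push c, curArm)

def ParseToBoneList (unparsed : String) : List String × List String :=
  match unparsed.toList.foldl pvStepA ([], [], true, "", "") with
  | (boneList, armList, _, _, _) => (boneList, armList)

-- ===== PORT B =====
-- delimiter-scanning loop: find the next ':' (if none, stop), slice out the armature
-- name, then find the next '\n' (if none, stop), slice out the bone name, continue.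
def pvScanB (cs : List Char) (boneList armList : List String) :
    List String × List String :=
  match h : cs.dropWhile (· ≠ ':') with
  | [] => (boneList, armList)
  | _ :: cs₁ =>
    let arm := String.ofList (cs.takeWhile (· ≠ ':'))
    let armList' := if armList.contains arm then armList else armList ++ [arm]
    match h2 : cs₁.dropWhile (· ≠ '\n') with
    | [] => (boneList, armList')
    | _ :: cs₂ =>
      pvScanB cs₂ (boneList ++ [arm ++ ":" ++ String.ofList (cs₁.takeWhile (· ≠ '\n'))]) armList'
termination_by cs.length
decreasing_by
  have h1 : cs₁.length < cs.length := by
    have := List.length_dropWhile_le (p := (· ≠ ':')) (l := cs)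
    rw [h] at this; simp at this; omega
  have h3 : cs₂.length < cs₁.length := by
    have := List.length_dropWhile_le (p := (· ≠ '\n')) (l := cs₁)
    rw [h2] at this; simp at this; omega
  omega

def ParseToBoneList_alt (unparsed : String) : List String × List String :=
  pvScanB unparsed.toList [] []

-- ===== PRECONDITION & SPEC =====
def Spec_ParseToBoneList (unparsed : String) (out : List String × List String) : Prop := out = ParseToBoneList_alt unparsed
instance (unparsed : String) (out : List String × List String) : Decidable (Spec_ParseToBoneList unparsed out) := by unfold Spec_ParseToBoneList; infer_instance

-- ===== CLAIM (what is proved, stated in full; the proofs are below) =====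
def Claim_equal_ParseToBoneList : Prop := ∀ (unparsed : String), Dom_ParseToBoneList unparsed → Spec_ParseToBoneList unparsed (ParseToBoneList unparsed)

-- ===== LEMMAS AND PROOFS =====

-- projection of A's loop state onto the returned pair
def pvProj (st : List String × List String × Bool × String × String) :
    List String × List String :=
  match st with | (b, a, _, _, _) => (b, a)

-- the bone-reading half of pvScanB's loop body, as a proof-side helper
def pvScanBone (arm : String) (cs : List Char) (boneList armList : List String) :
    List String × List String :=
  match cs.dropWhile (· ≠ '\n') with
  | [] => (boneList, armList)
  | _ :: cs₂ =>
    pvScanB cs₂ (boneList ++ [arm ++ ":" ++ String.ofList (cs.takeWhile (· ≠ '\n'))]) armList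

theorem pvTakeWhile_app {p : Char → Bool} (r cs : List Char) (hr : ∀ c ∈ r, p c) :
    (r ++ cs).takeWhile p = r ++ cs.takeWhile p := by
  induction r with
  | nil => simp
  | cons a r ih =>
    simp only [List.cons_append, List.takeWhile_cons]
    rw [hr a (by simp)]
    simp [ih (fun c hc => hr c (by simp [hc]))]

theorem pvDropWhile_app {p : Char → Bool} (r cs : List Char) (hr : ∀ c ∈ r, p c) :
    (r ++ cs).dropWhile p = cs.dropWhile p := by
  induction r with
  | nil => simp
  | cons a r ih =>
    simp only [List.cons_append, List.dropWhile_cons]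
    rw [hr a (by simp)]
    simp [ih (fun c hc => hr c (by simp [hc]))]

theorem pvScanB_eq_scanBone (cs cs₁ : List Char) (x : Char) (boneList armList : List String)
    (h : cs.dropWhile (· ≠ ':') = x :: cs₁) :
    pvScanB cs boneList armList =
      pvScanBone (String.ofList (cs.takeWhile (· ≠ ':'))) cs₁ boneList
        (if armList.contains (String.ofList (cs.takeWhile (· ≠ ':'))) then armList
         else armList ++ [String.ofList (cs.takeWhile (· ≠ ':'))]) := by
  rw [pvScanB]
  split
  · rename_i heq; rw [heq] at h; cases h
  · rename_i y ys heq
    rw [heq] at h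
    cases h
    rw [pvScanBone]
    split
    · rename_i heq2
      rw [heq2]
    · rename_i z zs heq2
      rw [heq2]

theorem pvPush_mk (r : List Char) (c : Char) :
    (String.ofList r).push c = String.ofList (r ++ [c]) := by
  apply String.toList_injective
  simp [String.toList_push, String.toList_ofList]

theorem pvMain (n : Nat) : ∀ cs : List Char, cs.length ≤ n →
    (∀ (boneList armList : List String) (r : List Char) (ca : String), (':' ∉ r) →
      pvProj (cs.foldl pvStepA (boneList, armList, true, String.ofList r, ca)) =
        pvScanB (r ++ cs) boneList armList) ∧
    (∀ (boneList armList : List String) (r : List Char) (arm : String), ('\n' ∉ r) →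
      pvProj (cs.foldl pvStepA (boneList, armList, false, String.ofList r, arm)) =
        pvScanBone arm (r ++ cs) boneList armList) := by
  induction n with
  | zero =>
    intro cs hlen
    have hnil : cs = [] := List.length_eq_zero_iff.mp (Nat.le_zero.mp hlen)
    subst hnil
    constructor
    · intro boneList armList r ca hr
      rw [pvScanB]
      have : (r ++ ([] : List Char)).dropWhile (· ≠ ':') = [] := by
        simp only [List.append_nil]
        rw [List.dropWhile_eq_nil_iff]
        intro c hc; simp; exact fun h => hr (h ▸ hc)
      split
      · rfl
      · rename_i heq; rw [this] at heq; cases heq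
    · intro boneList armList r arm hr
      rw [pvScanBone]
      have : (r ++ ([] : List Char)).dropWhile (· ≠ '\n') = [] := by
        simp only [List.append_nil]
        rw [List.dropWhile_eq_nil_iff]
        intro c hc; simp; exact fun h => hr (h ▸ hc)
      rw [this]
      rfl
  | succ n ih =>
    intro cs hlen
    match cs with
    | [] => exact ih [] (by simp)
    | c :: cs' =>
      have hlen' : cs'.length ≤ n := by simpa using hlen
      constructor
      · intro boneList armList r ca hr
        simp only [List.foldl_cons]
        by_cases hc : c = ':'
        · subst hc
          have hdw : (r ++ ':' :: cs').dropWhile (· ≠ ':') = ':' :: cs' := by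
            rw [pvDropWhile_app _ _ (fun c hc => by simp; exact fun h => hr (h ▸ hc))]
            simp
          have htw : (r ++ ':' :: cs').takeWhile (· ≠ ':') = r := by
            rw [pvTakeWhile_app _ _ (fun c hc => by simp; exact fun h => hr (h ▸ hc))]
            simp
          rw [pvScanB_eq_scanBone _ _ _ _ _ hdw, htw]
          have := (ih cs' hlen').2 boneList
            (if armList.contains (String.ofList r) then armList else armList ++ [String.ofList r])
            [] (String.ofList r) (by simp)
          simp only [List.nil_append] at this
          have hstep : pvStepA (boneList, armList, true, String.ofList r, ca) ':' =
              (boneList,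
                (if armList.contains (String.ofList r) then armList
                 else armList ++ [String.ofList r]), false, "", String.ofList r) := by
            rw [pvStepA]; simp
          rw [hstep]
          exact this
        · have hstep : pvStepA (boneList, armList, true, String.ofList r, ca) c =
              (boneList, armList, true, String.ofList (r ++ [c]), ca) := by
            rw [pvStepA]; simp [hc, pvPush_mk]
          rw [hstep]
          have := (ih cs' hlen').1 boneList armList (r ++ [c]) ca
            (by intro h; rcases List.mem_append.mp h with h | h
                · exact hr h
                · simp at h; exact hc h.symm)
          rw [this, List.append_assoc]
          rfl
      · intro boneList armList r arm hr
        simp only [List.foldl_cons]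
        by_cases hc : c = '\n'
        · subst hc
          have hdw : (r ++ '\n' :: cs').dropWhile (· ≠ '\n') = '\n' :: cs' := by
            rw [pvDropWhile_app _ _ (fun c hc => by simp; exact fun h => hr (h ▸ hc))]
            simp
          have htw : (r ++ '\n' :: cs').takeWhile (· ≠ '\n') = r := by
            rw [pvTakeWhile_app _ _ (fun c hc => by simp; exact fun h => hr (h ▸ hc))]
            simp
          rw [pvScanBone, hdw, htw]
          have := (ih cs' hlen').1 (boneList ++ [arm ++ ":" ++ String.ofList r]) armList [] "" (by simp)
          simp only [List.nil_append] at this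
          have hstep : pvStepA (boneList, armList, false, String.ofList r, arm) '\n' =
              (boneList ++ [arm ++ ":" ++ String.ofList r], armList, true, "", "") := by
            rw [pvStepA]; simp
          rw [hstep]
          exact this
        · have hstep : pvStepA (boneList, armList, false, String.ofList r, arm) c =
              (boneList, armList, false, String.ofList (r ++ [c]), arm) := by
            rw [pvStepA]; simp [hc, pvPush_mk]
          rw [hstep]
          have := (ih cs' hlen').2 boneList armList (r ++ [c]) arm
            (by intro h; rcases List.mem_append.mp h with h | h
                · exact hr h
                · simp at h; exact hc h.symm)
          rw [this, List.append_assoc]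
          rfl

-- ===== VERDICT (by name: the statement is the Claim_ definition above) =====
theorem ParseToBoneList_spec : Claim_equal_ParseToBoneList := by
  intro unparsed _
  unfold Spec_ParseToBoneList ParseToBoneList ParseToBoneList_alt
  have := (pvMain unparsed.toList.length unparsed.toList (le_refl _)).1 [] [] [] "" (by simp)
  simp only [List.nil_append] at this
  have hmk : String.ofList ([] : List Char) = "" := rfl
  rw [hmk] at this
  rw [← this]
  rfl
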